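-- pv_equiv track=rewrite | github.com/DMZ-Consulting/Blue-Deer-Trading | discord_bot/backend/app/cogs/options_strategy.py | split_option_legs
-- ===== SOURCE A (Python) =====
-- def split_option_legs(leg_string: str) -> list[str]:
--     # First leg is implicitly positive if no sign
--     if not leg_string.startswith('+') and not leg_string.startswith('-'):
--         leg_string = '+' + leg_string
--
--     # Split the string by + or - while keeping the signs
--     legs = []
--     current_leg = ''
--
--     for char in leg_string:
--         if char in ['+', '-'] and current_leg:
--             legs.append(current_leg)
--             current_leg = char
--         else:
--             current_leg += char
--
--     # Add the last leg
--     if current_leg: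
--         legs.append(current_leg)
--
--     return legs
-- ===== SOURCE B (Python) =====
-- def split_option_legs(leg_string: str) -> list[str]:
--     # First leg is implicitly positive if no sign
--     if leg_string[:1] not in ('+', '-'):
--         leg_string = '+' + leg_string
--     return _legs(leg_string)
--
--
-- def _legs(s: str) -> list[str]:
--     # Peel off one leg (a leading char plus the following run of
--     # non-sign chars) and recurse on the remainder.
--     if not s:
--         return []
--     j = 1
--     while j < len(s) and s[j] not in '+-':
--         j += 1
--     return [s[:j]] + _legs(s[j:])
-- ===== Notes on version B (the rewrite author's own statement) =====
-- stated objective: simpler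
-- what changed: Replaces A's char-by-char state machine with mutable legs/current_leg buffers by a recursive decomposition that, after the same implicit-plus-sign normalization, peels one leg at a time (leading sign char plus the following run of non-sign chars) and recurses on the remainder.
import Mathlib
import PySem

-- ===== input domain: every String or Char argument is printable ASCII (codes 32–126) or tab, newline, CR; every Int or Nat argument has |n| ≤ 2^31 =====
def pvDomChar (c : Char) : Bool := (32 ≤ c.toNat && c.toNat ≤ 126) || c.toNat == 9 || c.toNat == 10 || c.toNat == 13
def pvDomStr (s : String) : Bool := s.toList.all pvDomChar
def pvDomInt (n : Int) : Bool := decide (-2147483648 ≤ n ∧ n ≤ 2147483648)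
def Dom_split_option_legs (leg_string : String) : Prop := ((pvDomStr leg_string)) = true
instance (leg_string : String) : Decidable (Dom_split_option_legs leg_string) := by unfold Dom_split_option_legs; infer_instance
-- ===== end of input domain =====

-- B replaces A's single-pass state machine (mutable legs/current_leg buffer) by a
-- recursive decomposition that peels one leg (sign char plus following non-sign run) per step;
-- objective: simpler/idiomatic, same behaviour on every input (both are total).

def pvIsSign (c : Char) : Bool := c == '+' || c == '-'

-- ===== PORT A =====
-- one step of A's for-loop over the characters, state = (legs, current_leg)
def pvStepA (st : List (List Char) × List Char) (c : Char) : List (List Char) × List Char :=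
  if pvIsSign c && !st.2.isEmpty then (st.1 ++ [st.2], [c]) else (st.1, st.2 ++ [c])

def split_option_legs (leg_string : String) : List String :=
  let cs := leg_string.toList
  let cs := if pvIsSign (cs.headD ' ') then cs else '+' :: cs
  let st := cs.foldl pvStepA ([], [])
  let legs := if st.2.isEmpty then st.1 else st.1 ++ [st.2]
  legs.map String.mk

-- ===== PORT B =====
-- the `while j < len(s) and s[j] not in '+-': j += 1` loop of Source B's _legs
def pvFindCut (cs : List Char) (j : Nat) : Nat :=
  if h : j < cs.length then
    if pvIsSign cs[j] then j else pvFindCut cs (j + 1)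
  else j
termination_by cs.length - j

theorem pvFindCut_ge (cs : List Char) (j : Nat) : j ≤ pvFindCut cs j := by
  unfold pvFindCut
  split
  · split
    · exact le_refl _
    · exact le_trans (Nat.le_succ j) (pvFindCut_ge cs (j + 1))
  · exact le_refl _
termination_by cs.length - j

-- Source B's _legs: take one leg s[:j], recurse on s[j:]
def pvLegsB (cs : List Char) : List String :=
  match cs with
  | [] => []
  | c :: rest =>
      let j := pvFindCut (c :: rest) 1
      String.mk ((c :: rest).take j) :: pvLegsB ((c :: rest).drop j)
termination_by cs.length
decreasing_by
  have h1 : 1 ≤ pvFindCut (c :: rest) 1 := pvFindCut_ge _ _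
  simp
  omega

def split_option_legs_alt (leg_string : String) : List String :=
  let cs := leg_string.toList
  let cs := if pvIsSign (cs.headD ' ') then cs else '+' :: cs
  pvLegsB cs

-- ===== PRECONDITION & SPEC =====
def Spec_split_option_legs (leg_string : String) (out : List String) : Prop := out = split_option_legs_alt leg_string
instance (leg_string : String) (out : List String) : Decidable (Spec_split_option_legs leg_string out) := by unfold Spec_split_option_legs; infer_instance

-- ===== CLAIM (what is proved, stated in full; the proofs are below) =====
def Claim_equal_split_option_legs : Prop := ∀ (leg_string : String), Dom_split_option_legs leg_string → Spec_split_option_legs leg_string (split_option_legs leg_string)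

-- ===== LEMMAS AND PROOFS =====

def pvNotSign (c : Char) : Bool := !pvIsSign c

-- reference span-based splitter (List Char level)
def pvLegsC (cs : List Char) : List (List Char) :=
  match cs with
  | [] => []
  | c :: rest =>
      (c :: rest.takeWhile pvNotSign) :: pvLegsC (rest.dropWhile pvNotSign)
termination_by cs.length
decreasing_by
  have := List.length_dropWhile_le (p := pvNotSign) (l := rest)
  simp; omega

theorem take_length_takeWhile {p : Char → Bool} (l : List Char) :
    l.take (l.takeWhile p).length = l.takeWhile p := by
  induction l with
  | nil => rfl
  | cons c t ih =>
    by_cases h : p c = true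
    · simp [h, ih]
    · simp [h]

theorem drop_length_takeWhile {p : Char → Bool} (l : List Char) :
    l.drop (l.takeWhile p).length = l.dropWhile p := by
  induction l with
  | nil => rfl
  | cons c t ih =>
    by_cases h : p c = true
    · simp [List.dropWhile_cons, h, ih]
    · simp [List.dropWhile_cons, h]

theorem pvFindCut_spec (cs : List Char) (j : Nat) :
    pvFindCut cs j = j + ((cs.drop j).takeWhile pvNotSign).length := by
  unfold pvFindCut
  split
  · rename_i h
    have hd : cs.drop j = cs[j] :: cs.drop (j + 1) := List.drop_eq_getElem_cons h
    split
    · rename_i hs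
      rw [hd]
      simp only [List.takeWhile_cons, pvNotSign, hs]
      simp
    · rename_i hs
      rw [pvFindCut_spec cs (j + 1)]
      rw [hd]
      simp only [Bool.not_eq_true] at hs
      simp only [List.takeWhile_cons, pvNotSign, hs]
      simp
      omega
  · rename_i h
    have hnil : cs.drop j = [] := List.drop_eq_nil_of_le (by omega)
    rw [hnil]
    simp
termination_by cs.length - j

theorem pvLegsB_eq (cs : List Char) : pvLegsB cs = (pvLegsC cs).map String.mk := by
  match cs with
  | [] => simp [pvLegsB, pvLegsC]
  | c :: rest =>
    rw [pvLegsB, pvLegsC]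
    have hcut : pvFindCut (c :: rest) 1 = 1 + (rest.takeWhile pvNotSign).length := by
      rw [pvFindCut_spec]; simp
    have htake : (c :: rest).take (pvFindCut (c :: rest) 1) = c :: rest.takeWhile pvNotSign := by
      rw [hcut]
      simp [List.take_cons, take_length_takeWhile]
    have hdrop : (c :: rest).drop (pvFindCut (c :: rest) 1) = rest.dropWhile pvNotSign := by
      rw [hcut]
      simp [List.drop_cons, drop_length_takeWhile]
    simp only [htake, hdrop, List.map_cons]
    have hlt : (rest.dropWhile pvNotSign).length < (c :: rest).length := by
      have := List.length_dropWhile_le (p := pvNotSign) (l := rest)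
      simp; omega
    rw [pvLegsB_eq (rest.dropWhile pvNotSign)]
termination_by cs.length
decreasing_by
  have := List.length_dropWhile_le (p := pvNotSign) (l := rest)
  simp; omega

-- the key invariant of A's loop: with a nonempty current leg, the rest of the fold
-- produces exactly the span decomposition
theorem pvFoldA_spec (cs : List Char) (legs : List (List Char)) (cur : List Char)
    (hcur : cur ≠ []) :
    (let st := cs.foldl pvStepA (legs, cur);
     if st.2.isEmpty then st.1 else st.1 ++ [st.2]) =
    legs ++ (cur ++ cs.takeWhile pvNotSign) :: pvLegsC (cs.dropWhile pvNotSign) := by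
  induction cs generalizing legs cur with
  | nil =>
    simp [List.foldl, pvLegsC, hcur]
  | cons c rest ih =>
    by_cases hs : pvIsSign c = true
    · have hstep : pvStepA (legs, cur) c = (legs ++ [cur], [c]) := by
        simp [pvStepA, hs, hcur]
      simp only [List.foldl_cons, hstep]
      rw [ih (legs ++ [cur]) [c] (by simp)]
      simp [pvNotSign, hs, pvLegsC]
    · have hstep : pvStepA (legs, cur) c = (legs, cur ++ [c]) := by
        simp [pvStepA, hs]
      simp only [List.foldl_cons, hstep]
      rw [ih legs (cur ++ [c]) (by simp)]
      simp [pvNotSign, hs]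

theorem pvCore (cs : List Char) (hne : cs ≠ []) :
    (let st := cs.foldl pvStepA ([], []);
     let legs := if st.2.isEmpty then st.1 else st.1 ++ [st.2];
     legs.map String.mk) = pvLegsB cs := by
  obtain ⟨c, rest, rfl⟩ : ∃ c rest, cs = c :: rest := by
    cases cs with
    | nil => exact absurd rfl hne
    | cons a b => exact ⟨a, b, rfl⟩
  have hfirst : pvStepA ([], []) c = ([], [c]) := by simp [pvStepA]
  simp only [List.foldl_cons, hfirst]
  rw [pvFoldA_spec rest [] [c] (by simp), pvLegsB_eq, pvLegsC]
  simp

-- ===== VERDICT (by name: the statement is the Claim_ definition above) =====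
theorem split_option_legs_spec : Claim_equal_split_option_legs := by
  intro leg_string _
  show split_option_legs leg_string = split_option_legs_alt leg_string
  simp only [split_option_legs, split_option_legs_alt]
  apply pvCore
  split
  · rename_i h
    intro hnil
    rw [hnil] at h
    simp [pvIsSign] at h
  · simp
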